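-- pv_equiv track=rewrite | github.com/MrBrantCode/unitest_baseline | mut_generate/mist_train_cf/cf_94064/solution.py | validate_credit_card_number
-- ===== SOURCE A (Python) =====
-- def validate_credit_card_number(card_number):
--     # Remove any spaces or dashes from the card number
--     card_number = card_number.replace(' ', '').replace('-', '')
--
--     # Check the length of the card number
--     if len(card_number) not in [15, 16]:
--         return False, None
--
--     # Check the card number prefix and length for each type
--     if card_number[0] == '4' and len(card_number) == 16:
--         card_type = 'Visa'
--     elif card_number[:2] in ['51', '52', '53', '54', '55'] and len(card_number) == 16:
--         card_type = 'MasterCard'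
--     elif card_number[:2] in ['34', '37'] and len(card_number) == 15:
--         card_type = 'American Express'
--     elif card_number[:4] == '6011' and len(card_number) == 16:
--         card_type = 'Discover'
--     else:
--         return False, None
--
--     # Apply the Luhn algorithm to validate the card number
--     checksum = 0
--     is_second_digit = False
--     for digit in card_number[::-1]:
--         digit = int(digit)
--         if is_second_digit:
--             digit *= 2
--             if digit > 9:
--                 digit -= 9
--         checksum += digit
--         is_second_digit = not is_second_digit
--
--     return checksum % 10 == 0, card_type
-- ===== SOURCE B (Python) =====
-- def _double(d):
--     q, r = divmod(2 * d, 10)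
--     return q + r
--
--
-- def validate_credit_card_number(card_number):
--     card_number = card_number.replace(' ', '').replace('-', '')
--     n = len(card_number)
--
--     # Branch on length first, then on prefix, to pick the card type
--     card_type = None
--     if n == 16:
--         if card_number[0] == '4':
--             card_type = 'Visa'
--         elif card_number[:2] in ('51', '52', '53', '54', '55'):
--             card_type = 'MasterCard'
--         elif card_number[:4] == '6011':
--             card_type = 'Discover'
--     elif n == 15:
--         if card_number[:2] in ('34', '37'):
--             card_type = 'American Express'
--     if card_type is None:
--         return False, None
--
--     # Luhn as a position-parity decomposition: two slice passes, no toggle state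
--     digits = [int(d) for d in card_number]
--     rev = digits[::-1]
--     odd_sum = sum(rev[0::2])
--     even_sum = sum(_double(d) for d in rev[1::2])
--     return (odd_sum + even_sum) % 10 == 0, card_type
-- ===== Notes on version B (the rewrite author's own statement) =====
-- stated objective: alternative
-- what changed: Type detection branches on length first instead of a prefix-first elif chain, and the Luhn checksum is computed as two slice-based parity sums (straight digits vs divmod-folded doubled digits) instead of one reversed loop with a toggle flag and accumulator.
import Mathlib
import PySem

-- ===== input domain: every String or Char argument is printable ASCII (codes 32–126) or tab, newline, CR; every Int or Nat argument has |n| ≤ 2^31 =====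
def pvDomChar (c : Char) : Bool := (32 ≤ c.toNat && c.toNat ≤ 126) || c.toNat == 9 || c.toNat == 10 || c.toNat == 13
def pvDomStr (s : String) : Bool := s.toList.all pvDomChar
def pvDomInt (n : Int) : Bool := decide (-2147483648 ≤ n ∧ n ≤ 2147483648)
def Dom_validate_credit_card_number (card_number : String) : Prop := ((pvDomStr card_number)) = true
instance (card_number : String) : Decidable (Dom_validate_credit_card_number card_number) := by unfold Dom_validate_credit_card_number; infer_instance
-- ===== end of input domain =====

-- B restructures A: type detection branches on length first, and the Luhn checksum becomes two
-- slice-based parity sums (plain digits + divmod-folded doubled digits) instead of one reversed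
-- toggle-flag loop. Equivalence of the RETURN value is proved on Pre_ (A raises ValueError outside it).

-- int(c) for a one-character string; total form of Python's int() — under Pre_ every character
-- reaching it is a decimal digit, where ofChars? returns some.
def pvIntChar (c : Char) : Int := (PySem.Int.ofChars? [c]).getD 0

-- both Pythons do card_number.replace(' ', '').replace('-', '')
def pvStrip (card_number : String) : List Char :=
  PySem.Chars.replace (PySem.Chars.replace card_number.toList [' '] []) ['-'] []

-- ===== PORT A =====
-- the body of A's reversed loop: digit = int(c); double/fold if is_second_digit; toggle the flag
def luhnStepA (acc : Int × Bool) (c : Char) : Int × Bool :=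
  let d := pvIntChar c
  let d := if acc.2 then (if d * 2 > 9 then d * 2 - 9 else d * 2) else d
  (acc.1 + d, !acc.2)

def validate_credit_card_number (card_number : String) : Bool × Option String :=
  let cs := pvStrip card_number
  if cs.length = 15 ∨ cs.length = 16 then
    let ct? : Option String :=
      if PySem.List.pyGetD cs 0 ' ' = '4' ∧ cs.length = 16 then some "Visa"
      else if PySem.List.slice cs none (some 2) ∈
          [['5','1'], ['5','2'], ['5','3'], ['5','4'], ['5','5']] ∧ cs.length = 16 then some "MasterCard"
      else if PySem.List.slice cs none (some 2) ∈ [['3','4'], ['3','7']] ∧ cs.length = 15 then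
        some "American Express"
      else if PySem.List.slice cs none (some 4) = ['6','0','1','1'] ∧ cs.length = 16 then some "Discover"
      else none
    match ct? with
    | none => (false, none)
    | some ct =>
      let r := ((PySem.List.slice? cs none none (-1)).getD []).foldl luhnStepA (0, false)
      (decide (PySem.Int.mod r.1 10 = 0), some ct)
  else (false, none)

-- ===== PORT B =====
-- _double(d): q, r = divmod(2*d, 10); q + r
def pvDouble (d : Int) : Int := PySem.Int.floordiv (2 * d) 10 + PySem.Int.mod (2 * d) 10

def validate_credit_card_number_alt (card_number : String) : Bool × Option String :=
  let cs := pvStrip card_number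
  let n := cs.length
  let ct? : Option String :=
    if n = 16 then
      if PySem.List.pyGetD cs 0 ' ' = '4' then some "Visa"
      else if PySem.List.slice cs none (some 2) ∈
          [['5','1'], ['5','2'], ['5','3'], ['5','4'], ['5','5']] then some "MasterCard"
      else if PySem.List.slice cs none (some 4) = ['6','0','1','1'] then some "Discover"
      else none
    else if n = 15 then
      if PySem.List.slice cs none (some 2) ∈ [['3','4'], ['3','7']] then some "American Express"
      else none
    else none
  match ct? with
  | none => (false, none)
  | some ct =>
    let digits := cs.map pvIntChar
    let rev := (PySem.List.slice? digits none none (-1)).getD []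
    let oddSum := ((PySem.List.slice? rev (some 0) none 2).getD []).sum
    let evenSum := (((PySem.List.slice? rev (some 1) none 2).getD []).map pvDouble).sum
    (decide (PySem.Int.mod (oddSum + evenSum) 10 = 0), some ct)

-- ===== PRECONDITION & SPEC =====
-- Pre_ excludes exactly the inputs where A raises ValueError: a stripped card number whose length
-- and prefix name a card type but which contains a non-digit character (int() then raises).
def Pre_validate_credit_card_number (card_number : String) : Prop :=
  let cs := pvStrip card_number
  ((cs.length = 16 ∧ (cs.take 1 = ['4'] ∨
      cs.take 2 ∈ [['5','1'], ['5','2'], ['5','3'], ['5','4'], ['5','5']] ∨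
      cs.take 4 = ['6','0','1','1'])) ∨
   (cs.length = 15 ∧ cs.take 2 ∈ [['3','4'], ['3','7']])) →
  cs.all Char.isDigit = true
instance (card_number : String) : Decidable (Pre_validate_credit_card_number card_number) := by
  unfold Pre_validate_credit_card_number; infer_instance

def pvWitness_validate_credit_card_number : String := "4111111111111111"

def Spec_validate_credit_card_number (card_number : String) (out : Bool × Option String) : Prop := out = validate_credit_card_number_alt card_number
instance (card_number : String) (out : Bool × Option String) : Decidable (Spec_validate_credit_card_number card_number out) := by unfold Spec_validate_credit_card_number; infer_instance

-- ===== CLAIM (what is proved, stated in full; the proofs are below) =====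
def Claim_equal_validate_credit_card_number : Prop := ∀ (card_number : String), Dom_validate_credit_card_number card_number → Pre_validate_credit_card_number card_number → Spec_validate_credit_card_number card_number (validate_credit_card_number card_number)

-- ===== LEMMAS AND PROOFS =====

-- elements at even / odd positions (proof-side characterisation of the step-2 slices)
mutual
def pvEvens {α : Type} : List α → List α
  | [] => []
  | x :: xs => x :: pvOdds xs
def pvOdds {α : Type} : List α → List α
  | [] => []
  | _ :: xs => pvEvens xs
end

lemma pvIntChar_isDigit (c : Char) (h : c.isDigit = true) :
    pvIntChar c = (c.toNat : Int) - 48 ∧ 0 ≤ pvIntChar c ∧ pvIntChar c ≤ 9 := by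
  simp only [Char.isDigit, ge_iff_le, Bool.and_eq_true, decide_eq_true_eq] at h
  obtain ⟨h1, h2⟩ := h
  rw [UInt32.le_iff_toNat_le] at h1 h2
  have key : ∀ (d : Char), c.toNat = d.toNat → c = d := fun d hd =>
    Char.ext (UInt32.toNat_inj.mp hd)
  have h1' : 48 ≤ c.toNat := h1
  have h2' : c.toNat ≤ 57 := h2
  interval_cases hn : c.toNat <;>
    (first
      | (rw [key '0' (by decide)]; decide) | (rw [key '1' (by decide)]; decide)
      | (rw [key '2' (by decide)]; decide) | (rw [key '3' (by decide)]; decide)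
      | (rw [key '4' (by decide)]; decide) | (rw [key '5' (by decide)]; decide)
      | (rw [key '6' (by decide)]; decide) | (rw [key '7' (by decide)]; decide)
      | (rw [key '8' (by decide)]; decide) | (rw [key '9' (by decide)]; decide))

lemma pvDouble_eq (d : Int) (h0 : 0 ≤ d) (h9 : d ≤ 9) :
    pvDouble d = (if d * 2 > 9 then d * 2 - 9 else d * 2) := by
  unfold pvDouble
  rw [PySem.Int.floordiv_eq_ediv_of_pos (by omega), PySem.Int.mod_eq_emod_of_pos (by omega)]
  split_ifs <;> omega

lemma luhn_fold_parity (l : List Int) (h : ∀ d ∈ l, 0 ≤ d ∧ d ≤ 9) (c : Int) :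
    (l.foldl (fun acc d => (acc.1 + (if acc.2 then (if d * 2 > 9 then d * 2 - 9 else d * 2) else d), !acc.2)) (c, false)).1
      = c + (pvEvens l).sum + ((pvOdds l).map pvDouble).sum ∧
    (l.foldl (fun acc d => (acc.1 + (if acc.2 then (if d * 2 > 9 then d * 2 - 9 else d * 2) else d), !acc.2)) (c, true)).1
      = c + ((pvEvens l).map pvDouble).sum + (pvOdds l).sum := by
  induction l generalizing c with
  | nil => simp [pvEvens, pvOdds]
  | cons x xs ih =>
    have hx := h x (by simp)
    have hxs : ∀ d ∈ xs, 0 ≤ d ∧ d ≤ 9 := fun d hd => h d (by simp [hd])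
    constructor
    · simp only [List.foldl_cons, Bool.false_eq_true, if_false, Bool.not_false]
      rw [(ih hxs (c + x)).2, pvEvens, pvOdds]
      simp only [List.sum_cons]; ring
    · simp only [List.foldl_cons, if_true, Bool.not_true]
      rw [(ih hxs _).1, pvEvens, pvOdds]
      simp only [List.sum_cons, List.map_cons, pvDouble_eq x hx.1 hx.2]; ring

lemma filterMap_parity {α : Type} (l : List α) :
    (List.range ((l.length + 1) / 2)).filterMap (fun k => l[2 * k]?) = pvEvens l ∧
    (List.range (l.length / 2)).filterMap (fun k => l[2 * k + 1]?) = pvOdds l := by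
  induction l with
  | nil => simp [pvEvens, pvOdds]
  | cons x xs ih =>
    constructor
    · have hn : ((x :: xs).length + 1) / 2 = xs.length / 2 + 1 := by simp; omega
      rw [hn, List.range_succ_eq_map, List.filterMap_cons]
      simp only [List.getElem?_cons_zero, Nat.mul_zero]
      rw [List.filterMap_map]
      have he : ((fun k => (x :: xs)[2 * k]?) ∘ Nat.succ) = (fun k => xs[2 * k + 1]?) := by
        funext k
        show (x :: xs)[2 * (k + 1)]? = xs[2 * k + 1]?
        rw [show 2 * (k + 1) = (2 * k + 1) + 1 by omega, List.getElem?_cons_succ]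
      rw [he, ih.2, pvEvens]
    · have hn : (x :: xs).length / 2 = (xs.length + 1) / 2 := by simp
      have he : (fun k => (x :: xs)[2 * k + 1]?) = (fun k => xs[2 * k]?) := by
        funext k
        rw [List.getElem?_cons_succ]
      rw [hn, he, ih.1, pvOdds]

lemma slice?_zero_two {α : Type} (l : List α) :
    PySem.List.slice? l (some 0) none 2 = some (pvEvens l) := by
  simp only [PySem.List.slice?, PySem.List.sliceIndices]
  norm_num
  have hcnt : (if 0 < l.length then (((l.length : Int) + 2 - 1) / 2).toNat else 0) = (l.length + 1) / 2 := by
    split_ifs <;> omega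
  rw [hcnt]
  have he : (fun x : Nat => l[(2 * (x : Int)).toNat]?) = (fun k => l[2 * k]?) := by
    funext k
    rw [show ((2 : Int) * (k : Int)).toNat = 2 * k from by omega]
  rw [he]
  exact (filterMap_parity l).1

lemma slice?_one_two {α : Type} (l : List α) :
    PySem.List.slice? l (some 1) none 2 = some (pvOdds l) := by
  cases l with
  | nil => rfl
  | cons y ys =>
    simp only [PySem.List.slice?, PySem.List.sliceIndices]
    norm_num
    have hcnt : (if 0 < ys.length then (((ys.length : Int) + 2 - 1) / 2).toNat else 0)
        = (y :: ys).length / 2 := by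
      simp only [List.length_cons]
      split_ifs <;> omega
    rw [hcnt]
    have he : (fun x : Nat => (y :: ys)[(1 + 2 * (x : Int)).toNat]?) = (fun k => (y :: ys)[2 * k + 1]?) := by
      funext k
      rw [show ((1 : Int) + 2 * (k : Int)).toNat = 2 * k + 1 from by omega]
    rw [he]
    exact (filterMap_parity (y :: ys)).2

-- the two checksum computations agree on an all-digit character list
lemma checksum_eq (cs : List Char) (hd : cs.all Char.isDigit = true) :
    (((PySem.List.slice? cs none none (-1)).getD []).foldl luhnStepA (0, false)).1
      = ((PySem.List.slice? ((PySem.List.slice? (cs.map pvIntChar) none none (-1)).getD []) (some 0) none 2).getD []).sum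
        + ((((PySem.List.slice? ((PySem.List.slice? (cs.map pvIntChar) none none (-1)).getD []) (some 1) none 2).getD []).map pvDouble).sum) := by
  rw [PySem.List.slice?_none_none_neg_one, PySem.List.slice?_none_none_neg_one]
  simp only [Option.getD_some]
  rw [slice?_zero_two, slice?_one_two]
  simp only [Option.getD_some]
  have hfold : cs.reverse.foldl luhnStepA (0, false)
      = (cs.reverse.map pvIntChar).foldl
          (fun acc d => (acc.1 + (if acc.2 then (if d * 2 > 9 then d * 2 - 9 else d * 2) else d), !acc.2)) (0, false) := by
    rw [List.foldl_map]
    rfl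
  have hb : ∀ d ∈ cs.reverse.map pvIntChar, 0 ≤ d ∧ d ≤ 9 := by
    intro d hdm
    obtain ⟨c, hc, rfl⟩ := List.mem_map.mp hdm
    have : c.isDigit = true := by
      rw [List.all_eq_true] at hd
      exact hd c (List.mem_reverse.mp hc)
    exact (pvIntChar_isDigit c this).2
  rw [hfold, (luhn_fold_parity _ hb 0).1, ← List.map_reverse]
  ring

-- ===== VERDICT (by name: the statement is the Claim_ definition above) =====
theorem validate_credit_card_number_spec : Claim_equal_validate_credit_card_number := by
  intro s hdom hpre
  unfold Spec_validate_credit_card_number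
  unfold Pre_validate_credit_card_number at hpre
  unfold validate_credit_card_number validate_credit_card_number_alt
  simp only []
  generalize hg : pvStrip s = cs at hpre ⊢
  simp only [] at hpre
  have hsl2 : PySem.List.slice cs none (some 2) = cs.take 2 := by
    show _ = List.take (Int.toNat 2) cs
    rw [PySem.List.slice_to (xs := cs) (b := 2) (by norm_num)]
  have hsl4 : PySem.List.slice cs none (some 4) = cs.take 4 := by
    show _ = List.take (Int.toNat 4) cs
    rw [PySem.List.slice_to (xs := cs) (b := 4) (by norm_num)]
  by_cases h16 : cs.length = 16
  · have h15 : ¬ cs.length = 15 := by omega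
    rw [if_pos (Or.inr h16), if_pos h16]
    by_cases hv : PySem.List.pyGetD cs 0 ' ' = '4'
    · have htk : cs.take 1 = ['4'] := by
        cases cs with
        | nil => simp at h16
        | cons c r => rw [PySem.List.pyGetD_zero_cons] at hv; simp [hv]
      have hd := hpre (Or.inl ⟨h16, Or.inl htk⟩)
      rw [if_pos ⟨hv, h16⟩, if_pos hv]
      simp only []
      rw [checksum_eq cs hd]
    · rw [if_neg (by tauto), if_neg hv]
      by_cases hm : PySem.List.slice cs none (some 2) ∈ [['5','1'],['5','2'],['5','3'],['5','4'],['5','5']]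
      · have hd := hpre (Or.inl ⟨h16, Or.inr (Or.inl (hsl2 ▸ hm))⟩)
        rw [if_pos ⟨hm, h16⟩, if_pos hm]
        simp only []
        rw [checksum_eq cs hd]
      · rw [if_neg (by tauto), if_neg hm, if_neg (by tauto)]
        by_cases hdis : PySem.List.slice cs none (some 4) = ['6','0','1','1']
        · have hd := hpre (Or.inl ⟨h16, Or.inr (Or.inr (hsl4 ▸ hdis))⟩)
          rw [if_pos ⟨hdis, h16⟩, if_pos hdis]
          simp only []
          rw [checksum_eq cs hd]
        · rw [if_neg (by tauto), if_neg hdis]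
  · by_cases h15 : cs.length = 15
    · rw [if_pos (Or.inl h15), if_neg h16, if_pos h15]
      rw [if_neg (by tauto), if_neg (by tauto)]
      by_cases ha : PySem.List.slice cs none (some 2) ∈ [['3','4'],['3','7']]
      · have hd := hpre (Or.inr ⟨h15, hsl2 ▸ ha⟩)
        rw [if_pos ⟨ha, h15⟩, if_pos ha]
        simp only []
        rw [checksum_eq cs hd]
      · rw [if_neg (by tauto), if_neg ha, if_neg (by tauto)]
    · rw [if_neg (by tauto), if_neg h16, if_neg h15]
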